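-- pv_equiv track=rewrite | github.com/gmy2013/icse26_failure_refinement | maximize_array_sum_prefixes/maximize_array_sum_prefixes/maximizer.py | maximize_prefix_sums
-- ===== SOURCE A (Python) =====
-- from typing import List
--
-- def maximize_prefix_sums(a: List[int]) -> List[int]:
--     """Maximizes the sum of each prefix of the array.
--
--     For each prefix a[0:i+1], counts all factors of 2 in the prefix,
--     transfers them to the largest element, and computes the sum.
--
--     Args:
--         a: List[int]. The input array.
--
--     Returns:
--         List[int]: The list of maximized prefix sums.
--     """
--     n: int = len(a)
--     prefix_sums: List[int] = []
--     prefix: List[int] = []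
--     for i in range(n):
--         prefix.append(a[i])
--         # Count total number of factors of 2 in the prefix
--         total_twos: int = 0
--         prefix_copy: List[int] = []
--         for num in prefix:
--             cnt: int = 0
--             val: int = num
--             while val % 2 == 0 and val > 0:
--                 val //= 2
--                 cnt += 1
--             total_twos += cnt
--             prefix_copy.append(val)
--         # Find the index of the largest element in prefix_copy
--         max_idx: int = 0
--         for idx in range(1, len(prefix_copy)):
--             if prefix_copy[idx] > prefix_copy[max_idx]:
--                 max_idx = idx
--         # Multiply the largest element by 2^total_twos
--         prefix_copy[max_idx] *= (1 << total_twos)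
--         # Compute the sum
--         prefix_sum: int = sum(prefix_copy)
--         prefix_sums.append(prefix_sum)
--     return prefix_sums
-- ===== SOURCE B (Python) =====
-- from typing import List
--
-- def maximize_prefix_sums(a: List[int]) -> List[int]:
--     """One pass: keep running sum of residuals, total count of factors of 2,
--     and the max residual; prefix answer = s + m * ((1 << twos) - 1)."""
--     out: List[int] = []
--     s = 0
--     twos = 0
--     m = None
--     for num in a:
--         v = num
--         c = 0
--         if v > 0:
--             while v % 2 == 0:
--                 v //= 2
--                 c += 1
--         s += v
--         twos += c
--         if m is None or v > m:
--             m = v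
--         out.append(s + m * ((1 << twos) - 1))
--     return out
-- ===== Notes on version B (the rewrite author's own statement) =====
-- stated objective: faster
-- what changed: B replaces A's quadratic re-scan of every prefix (re-stripping factors of 2, rebuilding the residual list and re-finding its max for each i) by a single pass that incrementally maintains the running sum of residuals, the total count of 2-factors and the maximum residual, emitting s + m*((1<<twos)-1) per element.
import Mathlib
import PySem

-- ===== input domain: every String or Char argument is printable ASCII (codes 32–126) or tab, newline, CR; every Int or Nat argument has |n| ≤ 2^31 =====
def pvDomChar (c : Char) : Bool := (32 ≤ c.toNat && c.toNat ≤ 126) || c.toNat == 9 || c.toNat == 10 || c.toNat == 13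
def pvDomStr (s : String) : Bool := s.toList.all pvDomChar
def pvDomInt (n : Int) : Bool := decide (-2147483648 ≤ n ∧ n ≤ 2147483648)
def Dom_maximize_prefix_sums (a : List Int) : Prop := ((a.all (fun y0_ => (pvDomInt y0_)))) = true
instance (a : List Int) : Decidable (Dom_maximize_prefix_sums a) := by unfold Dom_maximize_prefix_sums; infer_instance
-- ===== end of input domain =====

-- B is the same function computed in one pass (running residual sum, total twos, max residual); objective: faster (asymptotic).

-- ===== PORT A =====
-- the inner `while val % 2 == 0 and val > 0` loop; structural recursion on a fuel that
-- strictly exceeds the iteration count (each iteration halves a positive val), so it is exact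
def pvStripAGo : Nat → Int → Int → Int × Int
  | 0, val, cnt => (val, cnt)
  | f + 1, val, cnt =>
    if PySem.Int.mod val 2 = 0 ∧ 0 < val then pvStripAGo f (PySem.Int.floordiv val 2) (cnt + 1)
    else (val, cnt)

def pvStripA (val cnt : Int) : Int × Int := pvStripAGo (val.toNat + 1) val cnt

-- `for idx in range(1, len(prefix_copy)): if prefix_copy[idx] > prefix_copy[max_idx]: max_idx = idx`
-- (indices are in range, so `pyGetD … 0` is exact)
def pvMaxIdxStep (pc : List Int) (mi idx : Int) : Int :=
  if PySem.List.pyGetD pc idx 0 > PySem.List.pyGetD pc mi 0 then idx else mi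

def maximize_prefix_sums (a : List Int) : List Int :=
  -- `for i in range(n): pfx.append(a[i]); …` : left fold over a with state (prefix_sums, pfx)
  (a.foldl (fun (st : List Int × List Int) x =>
    let pfx := st.2 ++ [x]
    -- inner for-loop over pfx accumulating (total_twos, prefix_copy)
    let tp := pfx.foldl (fun (tp : Int × List Int) num =>
      let r := pvStripA num 0
      (tp.1 + r.2, tp.2 ++ [r.1])) (0, [])
    let max_idx := (PySem.List.pyRange 1 (tp.2.length : Int) 1).foldl (pvMaxIdxStep tp.2) 0
    -- `prefix_copy[max_idx] *= (1 << total_twos)`: max_idx is in range and total_twos ≥ 0,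
    -- so List.set at max_idx.toNat and 2 ^ total_twos.toNat are exact
    let pc := tp.2.set max_idx.toNat (PySem.List.pyGetD tp.2 max_idx 0 * 2 ^ tp.1.toNat)
    (st.1 ++ [pc.sum], pfx)) ([], [])).1

-- ===== PORT B =====
-- Source B's `if v > 0: while v % 2 == 0: …` stripping loop, fuelled as in pvStripAGo
def pvStripBGo : Nat → Int → Int → Int × Int
  | 0, v, c => (v, c)
  | f + 1, v, c =>
    if 0 < v ∧ PySem.Int.mod v 2 = 0 then pvStripBGo f (PySem.Int.floordiv v 2) (c + 1)
    else (v, c)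

def pvStripB (v c : Int) : Int × Int := pvStripBGo (v.toNat + 1) v c

def maximize_prefix_sums_alt (a : List Int) : List Int :=
  -- one pass; state = (out, s, twos, m); `1 << twos` with twos ≥ 0 is 2 ^ twos.toNat
  (a.foldl (fun (st : List Int × Int × Int × Option Int) num =>
    let r := pvStripB num 0
    let s := st.2.1 + r.1
    let twos := st.2.2.1 + r.2
    let m := match st.2.2.2 with
             | none => r.1
             | some mv => if r.1 > mv then r.1 else mv
    (st.1 ++ [s + m * (2 ^ twos.toNat - 1)], s, twos, some m)) ([], 0, 0, none)).1

-- ===== PRECONDITION & SPEC =====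
def Spec_maximize_prefix_sums (a : List Int) (out : List Int) : Prop := out = maximize_prefix_sums_alt a
instance (a : List Int) (out : List Int) : Decidable (Spec_maximize_prefix_sums a out) := by unfold Spec_maximize_prefix_sums; infer_instance

-- ===== CLAIM (what is proved, stated in full; the proofs are below) =====
def Claim_equal_maximize_prefix_sums : Prop := ∀ (a : List Int), Dom_maximize_prefix_sums a → Spec_maximize_prefix_sums a (maximize_prefix_sums a)

-- ===== LEMMAS AND PROOFS =====

-- the two stripping loops are the same function
theorem stripGoB_eq_stripGoA (f : Nat) : ∀ (v c : Int), pvStripBGo f v c = pvStripAGo f v c := by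
  induction f with
  | zero => intro v c; rfl
  | succ f ih =>
    intro v c
    simp only [pvStripBGo, pvStripAGo]
    by_cases h : PySem.Int.mod v 2 = 0 ∧ 0 < v
    · rw [if_pos ⟨h.2, h.1⟩, if_pos h]; exact ih _ _
    · rw [if_neg (by tauto), if_neg h]

theorem stripB_eq_stripA (v c : Int) : pvStripB v c = pvStripA v c :=
  stripGoB_eq_stripGoA _ v c

def pvRes (x : Int) : Int := (pvStripA x 0).1
def pvCnt (x : Int) : Int := (pvStripA x 0).2

-- the inner fold of A computes (Σ cnt, map res)
theorem innerA_eq (p : List Int) : ∀ (t0 : Int) (pc0 : List Int),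
    p.foldl (fun (tp : Int × List Int) num =>
      let r := pvStripA num 0
      (tp.1 + r.2, tp.2 ++ [r.1])) (t0, pc0)
    = (t0 + (p.map pvCnt).sum, pc0 ++ p.map pvRes) := by
  induction p with
  | nil => intro t0 pc0; simp
  | cons x xs ih =>
    intro t0 pc0
    simp only [List.foldl_cons, List.map_cons, List.sum_cons, ih]
    refine Prod.ext ?_ ?_
    · simp [pvCnt]; ring
    · simp [pvRes]

-- the argmax scan returns an in-range index of a maximal element
theorem argmax_spec (pc : List Int) : ∀ (j : Nat), 1 ≤ j → j ≤ pc.length →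
    ∃ k : Nat, (PySem.List.pyRange 1 (j : Int) 1).foldl (pvMaxIdxStep pc) 0 = (k : Int) ∧
      k < j ∧ ∀ i : Nat, i < j → pc.getD i 0 ≤ pc.getD k 0 := by
  intro j
  induction j with
  | zero => omega
  | succ j ih =>
    intro _ hle
    by_cases hj : 1 ≤ j
    · obtain ⟨k, hk, hklt, hub⟩ := ih hj (by omega)
      have hsplit : PySem.List.pyRange 1 ((j : Int) + 1) 1
          = PySem.List.pyRange 1 (j : Int) 1 ++ [(j : Int)] :=
        PySem.List.pyRange_one_succ_right (by exact_mod_cast hj)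
      have hcast : ((j : Int) + 1) = ((j + 1 : Nat) : Int) := by push_cast; ring
      rw [← hcast, hsplit, List.foldl_append, hk]
      simp only [List.foldl_cons, List.foldl_nil, pvMaxIdxStep]
      have hpk : PySem.List.pyGetD pc (k : Int) 0 = pc.getD k 0 := by
        simpa using PySem.List.pyGetD_natCast pc k 0
      have hpj : PySem.List.pyGetD pc (j : Int) 0 = pc.getD j 0 := by
        simpa using PySem.List.pyGetD_natCast pc j 0
      rw [hpk, hpj]
      by_cases hgt : pc.getD j 0 > pc.getD k 0
      · refine ⟨j, by rw [if_pos hgt], by omega, ?_⟩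
        intro i hi
        by_cases hij : i < j
        · exact le_trans (hub i hij) (le_of_lt hgt)
        · have : i = j := by omega
          simp [this]
      · refine ⟨k, by rw [if_neg hgt], by omega, ?_⟩
        intro i hi
        by_cases hij : i < j
        · exact hub i hij
        · have : i = j := by omega
          rw [this]; omega
    · have hj0 : j = 0 := by omega
      subst hj0
      refine ⟨0, ?_, by omega, ?_⟩
      · rw [show ((0 + 1 : Nat) : Int) = 1 by norm_num,
          PySem.List.pyRange_one_eq_nil le_rfl]
        simp
      · intro i hi
        have : i = 0 := by omega
        simp [this]

-- soundness of B's running-max accumulator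
def pvMStep (o : Option Int) (x : Int) : Option Int :=
  some (match o with
        | none => pvRes x
        | some mv => if pvRes x > mv then pvRes x else mv)

theorem mfold_sound (p : List Int) : ∀ (m0 : Int),
    ∃ mx : Int, p.foldl pvMStep (some m0) = some mx ∧ m0 ≤ mx ∧
      (∀ y ∈ p, pvRes y ≤ mx) ∧ (mx = m0 ∨ mx ∈ p.map pvRes) := by
  induction p with
  | nil => intro m0; exact ⟨m0, rfl, le_rfl, by simp, Or.inl rfl⟩
  | cons x xs ih =>
    intro m0
    obtain ⟨mx, hfold, hle, hub, hmem⟩ := ih (if pvRes x > m0 then pvRes x else m0)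
    refine ⟨mx, ?_, ?_, ?_, ?_⟩
    · simpa [pvMStep] using hfold
    · split_ifs at hle with h
      · omega
      · exact hle
    · intro y hy
      rcases List.mem_cons.mp hy with h | h
      · subst h; split_ifs at hle with h2 <;> omega
      · exact hub y h
    · rcases hmem with h | h
      · split_ifs at h with h2
        · exact Or.inr (by simp [h])
        · exact Or.inl h
      · exact Or.inr (List.mem_cons_of_mem _ h)

-- per-pfx value of A in closed form: for p ≠ [], A's pfx value is S + mx*(2^T - 1)
theorem valueA_closed (x : Int) (xs : List Int) :
    ∀ mx : Int, (x :: xs).foldl pvMStep none = some mx →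
    (let p := x :: xs
     let tp := p.foldl (fun (tp : Int × List Int) num =>
       let r := pvStripA num 0
       (tp.1 + r.2, tp.2 ++ [r.1])) (0, [])
     let max_idx := (PySem.List.pyRange 1 (tp.2.length : Int) 1).foldl (pvMaxIdxStep tp.2) 0
     ((tp.2.set max_idx.toNat (PySem.List.pyGetD tp.2 max_idx 0 * 2 ^ tp.1.toNat)).sum))
    = ((x :: xs).map pvRes).sum + mx * (2 ^ (((x :: xs).map pvCnt).sum).toNat - 1) := by
  intro mx hmx
  simp only []
  rw [innerA_eq]
  simp only [List.nil_append, zero_add]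
  set p := x :: xs with hp
  set pc := p.map pvRes with hpc
  set T := (p.map pvCnt).sum with hT
  have hlen : 1 ≤ pc.length := by simp [hpc, hp]
  obtain ⟨k, hk, hklt, hub⟩ := argmax_spec pc pc.length hlen le_rfl
  rw [hk]
  have hkn : ((k : Int)).toNat = k := by simp
  have hpg : PySem.List.pyGetD pc (k : Int) 0 = pc.getD k 0 := by
    simpa using PySem.List.pyGetD_natCast pc k 0
  -- mx is the same value as pc[k]: both are members and upper bounds
  obtain ⟨mx', hfold, _, hub', hmem'⟩ := mfold_sound xs (pvRes x)
  have hfold' : p.foldl pvMStep none = some mx' := by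
    simp only [hp, List.foldl_cons, pvMStep]
    exact hfold
  have hmx' : mx' = mx := by rw [hfold'] at hmx; exact Option.some.inj hmx
  subst mx'
  have hmxmem : mx ∈ pc := by
    rcases hmem' with h | h
    · rw [h, hpc, hp]; simp [List.mem_cons]
    · rw [hpc, hp]; simpa [List.mem_cons] using Or.inr h
  have hmxub : ∀ y ∈ pc, y ≤ mx := by
    intro y hy
    rw [hpc, hp] at hy
    rcases List.mem_map.mp hy with ⟨z, hz, rfl⟩
    rcases List.mem_cons.mp hz with h | h
    · subst h
      rcases hmem' with h2 | h2
      · omega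
      · rcases List.mem_map.mp h2 with ⟨w, hw, hwe⟩
        have := hub' w hw; omega
    · exact hub' z h
  have hkval : pc.getD k 0 = mx := by
    have h1 : pc.getD k 0 ≤ mx := by
      apply hmxub
      have : pc.getD k 0 = pc[k]'hklt := List.getD_eq_getElem pc 0 hklt
      rw [this]; exact List.getElem_mem _
    have h2 : mx ≤ pc.getD k 0 := by
      obtain ⟨i, hi, hie⟩ := List.mem_iff_getElem.mp hmxmem
      have : pc.getD i 0 = mx := by rw [List.getD_eq_getElem pc 0 hi, hie]
      rw [← this]; exact hub i hi
    omega
  rw [hkn, hpg, hkval]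
  have hsum := List.sum_set' pc k (mx * 2 ^ T.toNat)
  rw [hsum, dif_pos hklt]
  have : pc[k]'hklt = mx := by rw [← List.getD_eq_getElem pc 0 hklt, hkval]
  rw [this]; ring

-- the two outer folds agree (generalized over accumulated state)
theorem folds_agree (l : List Int) : ∀ (out : List Int) (p : List Int),
    (l.foldl (fun (st : List Int × List Int) x =>
      let pfx := st.2 ++ [x]
      let tp := pfx.foldl (fun (tp : Int × List Int) num =>
        let r := pvStripA num 0
        (tp.1 + r.2, tp.2 ++ [r.1])) (0, [])
      let max_idx := (PySem.List.pyRange 1 (tp.2.length : Int) 1).foldl (pvMaxIdxStep tp.2) 0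
      let pc := tp.2.set max_idx.toNat (PySem.List.pyGetD tp.2 max_idx 0 * 2 ^ tp.1.toNat)
      (st.1 ++ [pc.sum], pfx)) (out, p)).1
    = (l.foldl (fun (st : List Int × Int × Int × Option Int) num =>
        let r := pvStripB num 0
        let s := st.2.1 + r.1
        let twos := st.2.2.1 + r.2
        let m := match st.2.2.2 with
                 | none => r.1
                 | some mv => if r.1 > mv then r.1 else mv
        (st.1 ++ [s + m * (2 ^ twos.toNat - 1)], s, twos, some m))
        (out, (p.map pvRes).sum, (p.map pvCnt).sum, p.foldl pvMStep none)).1 := by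
  induction l with
  | nil => intro out p; rfl
  | cons x xs ih =>
    intro out p
    simp only [List.foldl_cons]
    rw [stripB_eq_stripA]
    obtain ⟨y, ys, hpx⟩ : ∃ y ys, p ++ [x] = y :: ys := by
      cases p with
      | nil => exact ⟨x, [], rfl⟩
      | cons a as => exact ⟨a, as ++ [x], rfl⟩
    obtain ⟨mx, hcons⟩ : ∃ mx, (p ++ [x]).foldl pvMStep none = some mx := by
      rw [hpx]
      obtain ⟨mz, hz, _⟩ := mfold_sound ys (pvRes y)
      exact ⟨mz, by simpa [pvMStep] using hz⟩
    have hmB : (match p.foldl pvMStep none with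
        | none => (pvStripA x 0).1
        | some mv => if (pvStripA x 0).1 > mv then (pvStripA x 0).1 else mv) = mx := by
      have h1 : (p ++ [x]).foldl pvMStep none
          = pvMStep (p.foldl pvMStep none) x := by
        rw [List.foldl_append]; rfl
      rw [h1] at hcons
      simp only [pvMStep, pvRes] at hcons
      cases hfp : p.foldl pvMStep none with
      | none => rw [hfp] at hcons; simpa using hcons
      | some mv => rw [hfp] at hcons; simpa using hcons
    have hval := valueA_closed y ys mx (by rw [← hpx]; exact hcons)
    simp only [] at hval
    rw [← hpx] at hval
    have hS : ((p ++ [x]).map pvRes).sum = (p.map pvRes).sum + (pvStripA x 0).1 := by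
      simp [pvRes]
    have hT : ((p ++ [x]).map pvCnt).sum = (p.map pvCnt).sum + (pvStripA x 0).2 := by
      simp [pvCnt]
    rw [ih (out ++ [_]) (p ++ [x]), hval, hS, hT, hcons, hmB]

-- ===== VERDICT (by name: the statement is the Claim_ definition above) =====
theorem maximize_prefix_sums_spec : Claim_equal_maximize_prefix_sums := by
  intro a _
  unfold Spec_maximize_prefix_sums maximize_prefix_sums maximize_prefix_sums_alt
  simpa using folds_agree a [] []
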